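-- pv_equiv track=rewrite | github.com/tilde-lab/tilde | tilde/core/common.py | html_formula
-- ===== SOURCE A (Python) =====
-- def html_formula(string):
--     sub, html_formula = False, ''
--     for n, i in enumerate(string):
--         if i.isdigit() or i=='.' or i=='-':
--             if not sub:
--                 html_formula += '<sub>'
--                 sub = True
--         else:
--             if sub and i != 'd':
--                 html_formula += '</sub>'
--                 sub = False
--         html_formula += i
--     if sub: html_formula += '</sub>'
--     return html_formula
-- ===== SOURCE B (Python) =====
-- def html_formula(string):
--     # Run-based rewrite: group each maximal subscript run at once with a span scan,
--     # instead of a char-by-char loop with an open/close flag.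
--     out = []
--     i, n = 0, len(string)
--     while i < n:
--         c = string[i]
--         if c.isdigit() or c == '.' or c == '-':
--             j = i + 1
--             while j < n and (string[j].isdigit() or string[j] in '.-d'):
--                 j += 1
--             out.append('<sub>' + string[i:j] + '</sub>')
--             i = j
--         else:
--             out.append(c)
--             i += 1
--     return ''.join(out)
-- ===== Notes on version B (the rewrite author's own statement) =====
-- stated objective: alternative
-- what changed: Replaces the char-by-char loop with an open/close boolean flag by a run-based scan that finds each maximal subscript run with an inner span scan and wraps it in one step.
import Mathlib
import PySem

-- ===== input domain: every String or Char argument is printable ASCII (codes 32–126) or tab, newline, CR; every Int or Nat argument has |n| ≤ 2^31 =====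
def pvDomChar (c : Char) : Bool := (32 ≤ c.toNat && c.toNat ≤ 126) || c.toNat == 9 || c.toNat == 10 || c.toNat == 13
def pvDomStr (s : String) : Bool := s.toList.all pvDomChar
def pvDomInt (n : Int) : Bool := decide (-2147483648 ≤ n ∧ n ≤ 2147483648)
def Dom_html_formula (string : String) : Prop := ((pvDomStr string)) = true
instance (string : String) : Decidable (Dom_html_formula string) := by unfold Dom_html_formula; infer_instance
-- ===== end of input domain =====

-- B replaces A's char-by-char loop with an open/close flag by a run-based scan
-- that wraps each maximal subscript run in one step (objective: alternative).

-- ===== PORT A =====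
-- one step of A's loop body, over state (sub flag, output chars so far)
def hfStep (st : Bool × List Char) (i : Char) : Bool × List Char :=
  if i.isDigit || i == '.' || i == '-' then
    if !st.1 then (true, st.2 ++ "<sub>".toList ++ [i])
    else (st.1, st.2 ++ [i])
  else
    if st.1 && i != 'd' then (false, st.2 ++ "</sub>".toList ++ [i])
    else (st.1, st.2 ++ [i])

def html_formula (string : String) : String :=
  String.mk
    (if (string.toList.foldl hfStep (false, [])).1 then
      (string.toList.foldl hfStep (false, [])).2 ++ "</sub>".toList
    else (string.toList.foldl hfStep (false, [])).2)

-- ===== PORT B =====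
-- starter chars open a run; continuation chars additionally include 'd'
def hfStart (c : Char) : Bool := c.isDigit || c == '.' || c == '-'
def hfCont (c : Char) : Bool := c.isDigit || c == '.' || c == '-' || c == 'd'

def hfAlt : List Char → List Char
  | [] => []
  | c :: rest =>
    if hfStart c then
      "<sub>".toList ++ (c :: rest.takeWhile hfCont) ++ "</sub>".toList
        ++ hfAlt (rest.dropWhile hfCont)
    else c :: hfAlt rest
termination_by l => l.length
decreasing_by
  · exact Nat.lt_succ_of_le (List.length_dropWhile_le _ _)
  · simp

def html_formula_alt (string : String) : String :=
  String.mk (hfAlt string.toList)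

-- ===== PRECONDITION & SPEC =====
def Spec_html_formula (string : String) (out : String) : Prop := out = html_formula_alt string
instance (string : String) (out : String) : Decidable (Spec_html_formula string out) := by unfold Spec_html_formula; infer_instance

-- ===== CLAIM (what is proved, stated in full; the proofs are below) =====
def Claim_equal_html_formula : Prop := ∀ (string : String), Dom_html_formula string → Spec_html_formula string (html_formula string)

-- ===== LEMMAS AND PROOFS =====

-- the rest of A's output from flag `sub` on remaining input `l` (output-so-far factored out)
def hfG : List Char → Bool → List Char
  | [], sub => if sub then "</sub>".toList else []
  | c :: l, sub =>
    if c.isDigit || c == '.' || c == '-' then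
      if !sub then "<sub>".toList ++ [c] ++ hfG l true
      else [c] ++ hfG l sub
    else
      if sub && c != 'd' then "</sub>".toList ++ [c] ++ hfG l false
      else [c] ++ hfG l sub

theorem hfG_foldl (l : List Char) : ∀ (sub : Bool) (acc : List Char),
    (if (l.foldl hfStep (sub, acc)).1 then (l.foldl hfStep (sub, acc)).2 ++ "</sub>".toList
     else (l.foldl hfStep (sub, acc)).2) = acc ++ hfG l sub := by
  induction l with
  | nil => intro sub acc; cases sub <;> simp [hfG]
  | cons c l ih =>
    intro sub acc
    rw [List.foldl_cons,
      show hfStep (sub, acc) c = ((hfStep (sub, acc) c).1, (hfStep (sub, acc) c).2) from rfl,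
      ih]
    simp only [hfStep, hfG]
    split_ifs <;> simp

theorem hfG_eq_alt (l : List Char) :
    hfG l false = hfAlt l ∧
      hfG l true = l.takeWhile hfCont ++ "</sub>".toList ++ hfAlt (l.dropWhile hfCont) := by
  suffices h : ∀ (n : Nat) (l : List Char), l.length ≤ n →
      hfG l false = hfAlt l ∧
        hfG l true = l.takeWhile hfCont ++ "</sub>".toList ++ hfAlt (l.dropWhile hfCont) from
    h l.length l le_rfl
  intro n
  induction n with
  | zero =>
    intro l hl
    have : l = [] := List.eq_nil_of_length_eq_zero (Nat.le_zero.mp hl)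
    subst this; simp [hfG, hfAlt]
  | succ n ih =>
    intro l hl
    match l with
    | [] => simp [hfG, hfAlt]
    | c :: rest =>
      have hrest : rest.length ≤ n := by simpa using hl
      have ihr := ih rest hrest
      by_cases hs : (c.isDigit || c == '.' || c == '-') = true
      · -- starter character: opens (and continues) a run
        have hc : hfCont c = true := by simp only [hfCont]; simp_all
        constructor
        · rw [hfAlt]
          simp [hfG, hfStart, hs, ihr.2, hc]
        · simp [hfG, hs, ihr.2, List.takeWhile_cons, List.dropWhile_cons, hc]
      · by_cases hd : c = 'd'
        · -- 'd': continues a run but never opens one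
          subst hd
          constructor
          · rw [hfAlt]
            simp [hfG, hfStart, hs, ihr.1]
          · simp [hfG, hs, ihr.2, List.takeWhile_cons, List.dropWhile_cons, hfCont]
        · -- ordinary character: closes any open run
          have hc : hfCont c = false := by
            simp only [hfCont]
            simp only [Bool.or_eq_true, not_or] at hs ⊢
            simp_all [hd]
          constructor
          · rw [hfAlt]
            simp [hfG, hfStart, hs, ihr.1]
          · rw [List.takeWhile_cons, List.dropWhile_cons]
            simp [hfAlt, hfG, hs, hd, hc, ihr.1, hfStart]

-- ===== VERDICT (by name: the statement is the Claim_ definition above) =====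
theorem html_formula_spec : Claim_equal_html_formula := by
  intro s _
  unfold Spec_html_formula html_formula html_formula_alt
  rw [hfG_foldl s.toList false [], (hfG_eq_alt s.toList).1]
  simp
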